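-- pv_equiv track=rewrite | github.com/nuuuri/Algorithm | 구현/BOJ_23291.py | rotate_arr_2
-- ===== SOURCE A (Python) =====
-- def rotate_arr_2(arr):
--     temp = [arr]
--     for _ in range(2):
--         arr_left, arr_right = [], []
--         for a in temp:
--             arr_left.append(a[:len(a)//2])
--             arr_right.append(a[len(a)//2:])
--
--         arr_left = [l[::-1] for l in arr_left[::-1]]
--         temp = [*arr_left, *arr_right]
--
--     return temp
-- ===== SOURCE B (Python) =====
-- def rotate_arr_2(arr):
--     n = len(arr)
--     h = n // 2
--     m0 = h // 2
--     m1 = (n - h) // 2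
--     return [arr[h:h+m1][::-1], arr[h-m0:h], arr[:h-m0][::-1], arr[h+m1:]]
-- ===== Notes on version B (the rewrite author's own statement) =====
-- stated objective: alternative
-- what changed: Replaces A's two iterations of the split-every-segment-then-reverse-the-left-halves loop over a growing temp list with a one-shot closed-form computation of the four final segments by index arithmetic (h=n//2, m0=h//2, m1=(n-h)//2) and four slices.
import Mathlib
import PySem

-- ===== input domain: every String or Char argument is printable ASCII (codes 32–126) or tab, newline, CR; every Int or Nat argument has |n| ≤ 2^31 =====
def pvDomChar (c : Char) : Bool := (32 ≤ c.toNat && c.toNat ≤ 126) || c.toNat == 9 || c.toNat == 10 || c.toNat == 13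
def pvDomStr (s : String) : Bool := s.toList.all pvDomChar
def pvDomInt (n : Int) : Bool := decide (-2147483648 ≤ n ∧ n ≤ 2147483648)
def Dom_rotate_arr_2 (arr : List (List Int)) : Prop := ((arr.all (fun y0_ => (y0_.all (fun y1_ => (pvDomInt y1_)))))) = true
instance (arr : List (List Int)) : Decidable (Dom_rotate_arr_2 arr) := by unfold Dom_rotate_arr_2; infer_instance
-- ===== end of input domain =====

-- B replaces A's two-pass split/reverse loop over a growing temp list by a closed-form
-- computation of the four final segments via index arithmetic (alternative decomposition, same cost).


-- ===== PORT A =====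
-- one iteration of A's outer loop body: split every list in temp, reverse the left parts
def pvStepA (temp : List (List (List Int))) : List (List (List Int)) :=
  -- inner for-loop: arr_left.append(a[:len(a)//2]); arr_right.append(a[len(a)//2:])
  let lr := temp.foldl
    (fun (lr : List (List (List Int)) × List (List (List Int))) a =>
      (lr.1 ++ [PySem.List.slice a none (some (PySem.Int.floordiv (a.length : Int) 2))],
       lr.2 ++ [PySem.List.slice a (some (PySem.Int.floordiv (a.length : Int) 2)) none]))
    ([], [])
  -- arr_left = [l[::-1] for l in arr_left[::-1]]  (l[::-1] is List.reverse: PySem.List.slice?_none_none_neg_one)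
  let arr_left := (lr.1.reverse).map List.reverse
  arr_left ++ lr.2

def rotate_arr_2 (arr : List (List Int)) : List (List (List Int)) :=
  -- temp = [arr]; for _ in range(2): temp = <loop body>
  (PySem.List.pyRange 0 2 1).foldl (fun temp _ => pvStepA temp) [arr]

-- ===== PORT B =====
def rotate_arr_2_alt (arr : List (List Int)) : List (List (List Int)) :=
  let n : Int := arr.length
  let h := PySem.Int.floordiv n 2
  let m0 := PySem.Int.floordiv h 2
  let m1 := PySem.Int.floordiv (n - h) 2
  [(PySem.List.slice arr (some h) (some (h + m1))).reverse,
   PySem.List.slice arr (some (h - m0)) (some h),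
   (PySem.List.slice arr none (some (h - m0))).reverse,
   PySem.List.slice arr (some (h + m1)) none]

-- ===== PRECONDITION & SPEC =====
def Spec_rotate_arr_2 (arr : List (List Int)) (out : List (List (List Int))) : Prop := out = rotate_arr_2_alt arr
instance (arr : List (List Int)) (out : List (List (List Int))) : Decidable (Spec_rotate_arr_2 arr out) := by unfold Spec_rotate_arr_2; infer_instance

-- ===== CLAIM (what is proved, stated in full; the proofs are below) =====
def Claim_equal_rotate_arr_2 : Prop := ∀ (arr : List (List Int)), Dom_rotate_arr_2 arr → Spec_rotate_arr_2 arr (rotate_arr_2 arr)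

-- ===== LEMMAS AND PROOFS =====

theorem floordiv_two_nat (m : Nat) : PySem.Int.floordiv (m : Int) 2 = ((m / 2 : Nat) : Int) := by
  exact_mod_cast PySem.Int.floordiv_natCast m 2

theorem stepA_single (x : List (List Int)) :
    pvStepA [x] = [(x.take (x.length / 2)).reverse, x.drop (x.length / 2)] := by
  unfold pvStepA
  simp only [List.foldl, List.nil_append, floordiv_two_nat,
    PySem.List.slice_to_natCast, PySem.List.slice_from_natCast,
    List.reverse_cons, List.reverse_nil, List.map_cons, List.map_nil,
    List.cons_append]

theorem stepA_pair (x y : List (List Int)) :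
    pvStepA [x, y] = [(y.take (y.length / 2)).reverse, (x.take (x.length / 2)).reverse,
      x.drop (x.length / 2), y.drop (y.length / 2)] := by
  unfold pvStepA
  simp only [List.foldl, List.nil_append, List.cons_append,
    floordiv_two_nat, PySem.List.slice_to_natCast, PySem.List.slice_from_natCast,
    List.reverse_cons, List.reverse_nil, List.map_cons, List.map_nil, List.nil_append]

theorem rotate_eq (arr : List (List Int)) : rotate_arr_2 arr = rotate_arr_2_alt arr := by
  have hstep : rotate_arr_2 arr = pvStepA (pvStepA [arr]) := rfl
  rw [hstep, stepA_single]
  -- abbreviations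
  have hhn : arr.length / 2 ≤ arr.length := Nat.div_le_self _ 2
  have hlt : ((arr.take (arr.length / 2)).reverse).length = arr.length / 2 := by
    simp only [List.length_reverse, List.length_take]; omega
  have hld : (arr.drop (arr.length / 2)).length = arr.length - arr.length / 2 := by
    simp only [List.length_drop]
  rw [stepA_pair, hlt, hld]
  -- normalize B's side
  rw [rotate_arr_2_alt]
  simp only [floordiv_two_nat]
  have hsub : ((arr.length : Int) - ((arr.length / 2 : Nat) : Int)) = ((arr.length - arr.length / 2 : Nat) : Int) := by
    rw [Nat.cast_sub hhn]
  rw [hsub, floordiv_two_nat]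
  have hadd : ((arr.length / 2 : Nat) : Int) + (((arr.length - arr.length / 2) / 2 : Nat) : Int)
      = ((arr.length / 2 + (arr.length - arr.length / 2) / 2 : Nat) : Int) := by push_cast; ring
  have hsub2 : ((arr.length / 2 : Nat) : Int) - ((arr.length / 2 / 2 : Nat) : Int)
      = ((arr.length / 2 - arr.length / 2 / 2 : Nat) : Int) := by
    rw [Nat.cast_sub (Nat.div_le_self _ 2)]
  rw [hadd, hsub2]
  simp only [PySem.List.slice_natCast, PySem.List.slice_to_natCast, PySem.List.slice_from_natCast]
  refine congrArg₂ _ ?_ (congrArg₂ _ ?_ (congrArg₂ _ ?_ (congrArg₂ _ ?_ rfl)))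
  · -- segment 1: arr[h:h+m1][::-1]
    rw [Nat.add_sub_cancel_left]
  · -- segment 2: reversed-left-half's left quarter, reversed back = arr[h-m0:h]
    rw [List.take_reverse, List.reverse_reverse, List.length_take, Nat.min_eq_left hhn,
      List.drop_take]
  · -- segment 3: reversed-left-half's right part = arr[:h-m0][::-1]
    rw [List.drop_reverse, List.length_take, Nat.min_eq_left hhn, List.take_take,
      Nat.min_eq_left (Nat.sub_le _ _)]
  · -- segment 4: arr[h+m1:]
    rw [List.drop_drop]

-- ===== VERDICT (by name: the statement is the Claim_ definition above) =====
theorem rotate_arr_2_spec : Claim_equal_rotate_arr_2 := by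
  intro arr _
  exact rotate_eq arr
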